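-- pv_equiv track=rewrite | github.com/g1thubhub/phil_stopwatch | helper.py | findcovers
-- ===== SOURCE A (Python) =====
-- def cover(prefix, arr):
--     arr1 = arr.copy()
--     n = 0
--     while arr1[:len(prefix)] == prefix:
--         arr1 = arr1[len(prefix):]
--         n += 1
--     return n, arr1
--
-- def findcovers(stack, maxfraglen):
--     covers = []
--     for fraglen in range(1, maxfraglen + 1):
--         fragment = stack[:fraglen]
--         n, _ = cover(fragment, stack)
--         if n >= 2:
--             covers.append((fraglen, n))
--     return covers
-- ===== SOURCE B (Python) =====
-- def findcovers(stack, maxfraglen):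
--     # Single pass per period p: find the first self-overlap mismatch position l
--     # (= longest common prefix of stack and stack[p:]); the repetition count is
--     # l // p + 1.  Only p <= len(stack) // 2 can repeat at least twice.
--     n = len(stack)
--     covers = []
--     for p in range(1, min(maxfraglen, n // 2) + 1):
--         l = 0
--         for x, y in zip(stack, stack[p:]):
--             if x != y:
--                 break
--             l += 1
--         c = l // p + 1
--         if c >= 2:
--             covers.append((p, c))
--     return covers
-- ===== Notes on version B (the rewrite author's own statement) =====
-- stated objective: alternative
-- what changed: Instead of repeatedly slicing off the prefix and re-comparing for every fragment length, B computes for each period p the first self-overlap mismatch position l (one linear scan of stack against stack[p:]) and gets the repetition count in closed form as l//p+1, looping only up to min(maxfraglen, n//2) since longer fragments can never repeat twice.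
import Mathlib
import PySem

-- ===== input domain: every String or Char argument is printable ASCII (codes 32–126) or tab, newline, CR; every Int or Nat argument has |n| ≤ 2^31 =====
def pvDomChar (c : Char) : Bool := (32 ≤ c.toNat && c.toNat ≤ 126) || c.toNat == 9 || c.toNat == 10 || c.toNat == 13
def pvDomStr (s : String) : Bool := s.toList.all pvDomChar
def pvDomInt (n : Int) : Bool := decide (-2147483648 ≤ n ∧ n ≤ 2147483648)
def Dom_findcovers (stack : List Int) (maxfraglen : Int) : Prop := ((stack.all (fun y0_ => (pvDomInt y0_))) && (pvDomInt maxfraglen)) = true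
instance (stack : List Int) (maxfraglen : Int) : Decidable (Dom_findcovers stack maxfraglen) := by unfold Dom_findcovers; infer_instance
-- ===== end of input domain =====

-- B replaces A's repeated strip-and-compare per fragment length by one mismatch
-- scan per period p and the closed form l // p + 1, looping only to min(maxfraglen, n//2).

-- ===== PORT A =====
-- the while loop of `cover`; fuel = arr.length + 1 suffices whenever pre ≠ []
-- (each iteration drops ≥ 1 element); with pre = [] the Python loop diverges,
-- which Pre_findcovers excludes.  arr1[:len(pre)] / arr1[len(pre):] are
-- take/drop (nonnegative bound), exact.
def coverLoop (pre : List Int) (arr1 : List Int) (n : Int) (fuel : Nat) : Int × List Int :=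
  match fuel with
  | 0 => (n, arr1)
  | f + 1 =>
    if arr1.take pre.length = pre then
      coverLoop pre (arr1.drop pre.length) (n + 1) f
    else (n, arr1)

def cover (pre : List Int) (arr : List Int) : Int × List Int :=
  coverLoop pre arr 0 (arr.length + 1)

def findcovers (stack : List Int) (maxfraglen : Int) : List (Int × Int) :=
  (PySem.List.pyRange 1 (maxfraglen + 1) 1).foldl
    (fun covers fraglen =>
      let fragment := stack.take fraglen.toNat  -- stack[:fraglen], fraglen ≥ 1 in the range
      let n := (cover fragment stack).1
      if n ≥ 2 then covers ++ [(fraglen, n)] else covers) []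

-- ===== PORT B =====
-- Source B's inner `for x, y in zip(stack, stack[p:]) … break` loop: length of the
-- longest common pre of the two lists.
def lcpLen : List Int → List Int → Nat
  | x :: xs, y :: ys => if x = y then lcpLen xs ys + 1 else 0
  | _, _ => 0

def findcovers_alt (stack : List Int) (maxfraglen : Int) : List (Int × Int) :=
  let n : Int := stack.length
  (PySem.List.pyRange 1 (min maxfraglen (PySem.Int.floordiv n 2) + 1) 1).foldl
    (fun covers p =>
      let l : Int := lcpLen stack (stack.drop p.toNat)  -- stack[p:], p ≥ 1 in the range
      let c := PySem.Int.floordiv l p + 1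
      if c ≥ 2 then covers ++ [(p, c)] else covers) []

-- ===== PRECONDITION & SPEC =====
-- Excluded: stack = [] with maxfraglen ≥ 1, where A's `cover` loop never
-- terminates (the empty pre always matches); A returns on everything else.
def Pre_findcovers (stack : List Int) (maxfraglen : Int) : Prop :=
  stack ≠ [] ∨ maxfraglen < 1
instance (stack : List Int) (maxfraglen : Int) : Decidable (Pre_findcovers stack maxfraglen) := by
  unfold Pre_findcovers; infer_instance

def pvWitness_findcovers : List Int × Int := ([1, 1, 1, 2], 3)

def Spec_findcovers (stack : List Int) (maxfraglen : Int) (out : List (Int × Int)) : Prop :=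
  out = findcovers_alt stack maxfraglen
instance (stack : List Int) (maxfraglen : Int) (out : List (Int × Int)) : Decidable (Spec_findcovers stack maxfraglen out) := by
  unfold Spec_findcovers; infer_instance

-- ===== CLAIM (what is proved, stated in full; the proofs are below) =====
def Claim_equal_findcovers : Prop := ∀ (stack : List Int) (maxfraglen : Int), Dom_findcovers stack maxfraglen → Pre_findcovers stack maxfraglen → Spec_findcovers stack maxfraglen (findcovers stack maxfraglen)

-- ===== LEMMAS AND PROOFS =====

-- A's per-fragment count and B's per-period count, as functions of p.
def kA (stack : List Int) (p : Int) : Int := (cover (stack.take p.toNat) stack).1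

def kB (stack : List Int) (p : Int) : Int :=
  PySem.Int.floordiv ((lcpLen stack (stack.drop p.toNat) : Nat) : Int) p + 1

-- the common fold shape of both ports
def covFold (g : Int → Int) (L : List Int) (acc : List (Int × Int)) : List (Int × Int) :=
  L.foldl (fun covers p => if g p ≥ 2 then covers ++ [(p, g p)] else covers) acc

lemma findcovers_eq_covFold (stack : List Int) (M : Int) :
    findcovers stack M = covFold (kA stack) (PySem.List.pyRange 1 (M + 1) 1) [] := rfl

lemma findcovers_alt_eq_covFold (stack : List Int) (M : Int) :
    findcovers_alt stack M
      = covFold (kB stack)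
          (PySem.List.pyRange 1 (min M (PySem.Int.floordiv (stack.length : Int) 2) + 1) 1) [] := rfl

lemma covFold_congr (g h : Int → Int) :
    ∀ (L : List Int) (acc : List (Int × Int)), (∀ p ∈ L, g p = h p) →
      covFold g L acc = covFold h L acc := by
  intro L
  induction L with
  | nil => intro acc _; rfl
  | cons x xs ih =>
    intro acc hph
    have hx : g x = h x := hph x (by simp)
    simp only [covFold, List.foldl_cons] at *
    rw [hx]
    exact ih _ (fun p hp => hph p (by simp [hp]))

lemma covFold_of_small (g : Int → Int) :
    ∀ (L : List Int) (acc : List (Int × Int)), (∀ p ∈ L, g p < 2) →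
      covFold g L acc = acc := by
  intro L
  induction L with
  | nil => intro acc _; rfl
  | cons x xs ih =>
    intro acc h
    have hx : ¬ g x ≥ 2 := by have := h x (by simp); omega
    simp only [covFold, List.foldl_cons, if_neg hx]
    exact ih acc (fun p hp => h p (by simp [hp]))

lemma coverLoop_fst (pr : List Int) :
    ∀ (fuel : Nat) (arr : List Int) (n : Int),
      (coverLoop pr arr n fuel).1
        = n + ((coverLoop pr arr 0 fuel).1) := by
  intro fuel
  induction fuel with
  | zero => intro arr n; simp [coverLoop]
  | succ f ih =>
    intro arr n
    simp only [coverLoop]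
    split
    · rw [ih _ (n + 1), ih _ (0 + 1)]; ring
    · simp

-- lcp over a shared pre
lemma lcpLen_append (pr : List Int) (a b : List Int) :
    lcpLen (pr ++ a) (pr ++ b) = pr.length + lcpLen a b := by
  induction pr with
  | nil => simp
  | cons x xs ih => simp [lcpLen, ih]; omega

lemma lcpLen_le_right (a : List Int) : ∀ (b : List Int), lcpLen a b ≤ b.length := by
  induction a with
  | nil => intro b; cases b <;> simp [lcpLen]
  | cons x xs ih =>
    intro b
    cases b with
    | nil => simp [lcpLen]
    | cons y ys =>
      simp only [lcpLen]
      split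
      · have := ih ys; simp; omega
      · simp

lemma take_of_le_lcpLen (pr : List Int) :
    ∀ (u t : List Int), pr.length ≤ lcpLen (pr ++ u) t → t.take pr.length = pr := by
  induction pr with
  | nil => intro u t _; simp
  | cons x xs ih =>
    intro u t h
    cases t with
    | nil => simp [lcpLen] at h
    | cons y ys =>
      simp only [List.cons_append, lcpLen] at h
      by_cases hxy : x = y
      · rw [if_pos hxy] at h
        simp only [List.length_cons] at *
        have := ih u ys (by omega)
        simp [this, hxy]
      · rw [if_neg hxy] at h; simp at h

-- core count characterisation: A's stripping count equals lcp // |pr|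
lemma countRep_eq (pr : List Int) (hpr : pr ≠ []) :
    ∀ (fuel : Nat) (t : List Int), t.length < fuel →
      (coverLoop pr t 0 fuel).1 = ((lcpLen (pr ++ t) t / pr.length : Nat) : Int) := by
  intro fuel
  induction fuel with
  | zero => intro t h; omega
  | succ f ih =>
    intro t hlt
    have hm : 0 < pr.length := List.length_pos_iff.mpr hpr
    simp only [coverLoop]
    by_cases h : t.take pr.length = pr
    · rw [if_pos h]
      -- t = pr ++ t'
      have hlen : pr.length ≤ t.length := by
        have := congrArg List.length h
        simp at this; omega
      have ht : t = pr ++ t.drop pr.length := by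
        conv_lhs => rw [← List.take_append_drop pr.length t]
        rw [h]
      have hlt' : (t.drop pr.length).length < f := by
        simp [List.length_drop]; omega
      rw [coverLoop_fst pr f (t.drop pr.length) (0 + 1)]
      rw [ih (t.drop pr.length) hlt']
      have hsplit : lcpLen (pr ++ t) t
          = pr.length + lcpLen (pr ++ t.drop pr.length) (t.drop pr.length) := by
        conv_lhs => rw [ht]
        exact lcpLen_append pr _ _
      rw [hsplit]
      have : (pr.length + lcpLen (pr ++ t.drop pr.length) (t.drop pr.length)) / pr.length
          = lcpLen (pr ++ t.drop pr.length) (t.drop pr.length) / pr.length + 1 := by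
        rw [Nat.add_comm, Nat.add_div_right _ hm]
      rw [this]
      push_cast
      ring
    · rw [if_neg h]
      have hlcp : lcpLen (pr ++ t) t < pr.length := by
        by_contra hge
        exact h (take_of_le_lcpLen pr t t (by omega))
      rw [Nat.div_eq_of_lt hlcp]
      simp

-- pointwise: the two counts agree for every period p ≥ 1 (stack nonempty)
lemma kA_eq_kB (stack : List Int) (hs : stack ≠ []) (p : Int) (hp : 1 ≤ p) :
    kA stack p = kB stack p := by
  have hn : 0 < stack.length := List.length_pos_iff.mpr hs
  have hm : 1 ≤ p.toNat := by omega
  set m := p.toNat with hmdef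
  have hpcast : p = (m : Int) := by omega
  by_cases hcase : m ≤ stack.length
  · -- fragment has length exactly m; strip count = lcp/m + 1
    have hprlen : (stack.take m).length = m := by simp; omega
    have hpr : stack.take m ≠ [] := by
      intro hnil; rw [hnil] at hprlen; simp at hprlen; omega
    have ht : stack = stack.take m ++ stack.drop m := (List.take_append_drop m stack).symm
    unfold kA cover
    have hfuel : (stack.drop m).length < stack.length := by simp; omega
    simp only [coverLoop]
    rw [if_pos (by rw [hprlen]), hprlen]
    rw [coverLoop_fst (stack.take m) stack.length (stack.drop m) (0 + 1)]
    rw [countRep_eq (stack.take m) hpr stack.length (stack.drop m) hfuel]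
    have hlcp : lcpLen (stack.take m ++ stack.drop m) (stack.drop m)
        = lcpLen stack (stack.drop m) := by rw [← ht]
    unfold kB
    rw [hlcp, hprlen, hpcast, PySem.Int.floordiv_natCast]
    simp only [Int.toNat_natCast]
    ring
  · -- p beyond the stack: fragment = stack, count 1; B: lcp with [] is 0
    rw [Nat.not_le] at hcase
    have htake : stack.take m = stack := List.take_of_length_le (by omega)
    have hdrop : stack.drop m = [] := List.drop_eq_nil_of_le (by omega)
    unfold kA cover
    rw [htake]
    have hn1 : stack.length + 1 = (stack.length - 1) + 1 + 1 := by omega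
    rw [hn1]
    simp only [coverLoop]
    rw [if_pos (by simp)]
    rw [if_neg (by simp only [List.drop_length, List.take_nil]; exact fun habs => hs habs.symm)]
    unfold kB
    rw [hdrop]
    have hlcp0 : lcpLen stack [] = 0 := by cases stack <;> simp [lcpLen]
    rw [hlcp0]
    have h0 : PySem.Int.floordiv (0 : Int) p = 0 := by
      rw [PySem.Int.floordiv_eq_ediv_of_pos (by omega)]; simp
    simp [h0]

-- B never evaluates its count; kB itself is < 2 past n//2
lemma kB_small (stack : List Int) (p : Int)
    (hp : PySem.Int.floordiv (stack.length : Int) 2 < p) : kB stack p = 1 := by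
  have hn2 : PySem.Int.floordiv (stack.length : Int) 2 = ((stack.length / 2 : Nat) : Int) := by
    exact_mod_cast PySem.Int.floordiv_natCast stack.length 2
  have hppos : 0 < p := by omega
  have hle : lcpLen stack (stack.drop p.toNat) ≤ stack.length - p.toNat := by
    have := lcpLen_le_right stack (stack.drop p.toNat)
    simpa using this
  have hlt : ((lcpLen stack (stack.drop p.toNat) : Nat) : Int) < p := by
    rw [hn2] at hp
    omega
  unfold kB
  rw [PySem.Int.floordiv_eq_ediv_of_pos hppos]
  rw [Int.ediv_eq_zero_of_lt (by positivity) hlt]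
  norm_num

-- ===== VERDICT (by name: the statement is the Claim_ definition above) =====
theorem findcovers_spec : Claim_equal_findcovers := by
  intro stack M _hdom hpre
  unfold Spec_findcovers
  rw [findcovers_eq_covFold, findcovers_alt_eq_covFold]
  set half := PySem.Int.floordiv (stack.length : Int) 2 with hhalf
  have hhalf0 : 0 ≤ half := by
    rw [hhalf, PySem.Int.floordiv_eq_ediv_of_pos (by norm_num)]; positivity
  by_cases hs : stack = []
  · -- then maxfraglen < 1: both ranges are empty
    rcases hpre with h | h
    · exact absurd hs h
    · rw [PySem.List.pyRange_one_eq_nil (by omega),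
          PySem.List.pyRange_one_eq_nil (by omega)]
      rfl
  · have hpt : ∀ p ∈ PySem.List.pyRange 1 (M + 1) 1, kA stack p = kB stack p := by
      intro p hp
      have := (PySem.List.mem_pyRange_one.mp hp).1
      exact kA_eq_kB stack hs p this
    rw [covFold_congr _ _ _ _ hpt]
    by_cases hM : M ≤ half
    · rw [min_eq_left hM]
    · rw [not_le] at hM
      rw [min_eq_right (le_of_lt hM)]
      rw [PySem.List.pyRange_one_append 1 (half + 1) (M + 1) (by omega) (by omega)]
      unfold covFold
      rw [List.foldl_append]
      exact covFold_of_small (kB stack) _ _ (by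
        intro p hp
        have := (PySem.List.mem_pyRange_one.mp hp).1
        rw [kB_small stack p (by omega)]
        omega)
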